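-- pv_equiv track=rewrite | github.com/kimgyuhee/Python | Chapter0_Algorithm/2306/230630/test02.py | solution
-- ===== SOURCE A (Python) =====
-- from collections import deque
--
-- def solution(bridge_length, weight, truck_weights):
--     answer = 0
--     truck_weights = deque(truck_weights)
--     pass_truck = []
--     crossing_truck = []
--     now_weight = truck_weights.popleft()
--     while truck_weights :
--         if len(truck_weights) == 1 :
--             answer = answer +bridge_length + 1
--         w = truck_weights.popleft()
--         now_weight +=w
--         if now_weight <= weight :
--             answer +=bridge_length
--             answer +=1
--         else :
--             answer +=bridge_length
--             now_weight = 0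
--
--     return answer
-- ===== SOURCE B (Python) =====
-- def solution(bridge_length, weight, truck_weights):
--     n = len(truck_weights)
--     now = truck_weights[0]        # IndexError on empty input, like A's popleft
--     if n == 1:
--         return 0
--     count = 0
--     for w in truck_weights[1:]:
--         now += w
--         if now <= weight:
--             count += 1
--         else:
--             now = 0
--     return n * bridge_length + 1 + count
-- ===== Notes on version B (the rewrite author's own statement) =====
-- stated objective: simpler
-- what changed: The interleaved answer accumulation (bridge_length per iteration plus an extra bridge_length+1 flagged on the last truck) is replaced by the closed form n*bridge_length+1, leaving a single loop that only counts iterations where the running weight stays within the limit (no deque, fewer per-iteration operations).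
import Mathlib
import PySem

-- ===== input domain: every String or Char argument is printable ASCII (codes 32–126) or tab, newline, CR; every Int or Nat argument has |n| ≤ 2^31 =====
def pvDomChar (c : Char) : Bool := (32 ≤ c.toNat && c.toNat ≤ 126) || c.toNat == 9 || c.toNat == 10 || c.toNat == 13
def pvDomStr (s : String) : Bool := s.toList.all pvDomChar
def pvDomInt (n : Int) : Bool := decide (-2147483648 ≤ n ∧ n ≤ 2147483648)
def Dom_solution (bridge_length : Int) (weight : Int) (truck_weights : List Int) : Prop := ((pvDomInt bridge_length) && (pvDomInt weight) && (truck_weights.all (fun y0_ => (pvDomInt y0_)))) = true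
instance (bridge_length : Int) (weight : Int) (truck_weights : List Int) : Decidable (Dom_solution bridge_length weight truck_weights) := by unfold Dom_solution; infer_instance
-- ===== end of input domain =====

-- B replaces A's interleaved answer accumulation with the closed form n*bridge_length+1 plus a
-- count of within-limit iterations (objective: simpler); Pre_ excludes the empty list, on which A raises IndexError.

-- ===== PORT A =====
-- the while-loop over the remaining deque, threading (now_weight, answer)
def solutionLoopA (bridge_length : Int) (weight : Int) : List Int → Int → Int → Int
  | [], _, answer => answer
  | w :: rest, now_weight, answer =>
    let answer := if (w :: rest).length == 1 then answer + bridge_length + 1 else answer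
    let now_weight := now_weight + w
    if now_weight ≤ weight then
      solutionLoopA bridge_length weight rest now_weight (answer + bridge_length + 1)
    else
      solutionLoopA bridge_length weight rest 0 (answer + bridge_length)

def solution (bridge_length : Int) (weight : Int) (truck_weights : List Int) : Int :=
  match truck_weights with
  | [] => 0  -- unreachable under Pre_solution: Python raises IndexError at popleft
  | t :: rest => solutionLoopA bridge_length weight rest t 0

-- ===== PORT B =====
-- the for-loop over truck_weights[1:], threading now and returning the count
def countLoopB (weight : Int) : List Int → Int → Int
  | [], _ => 0
  | w :: rest, now =>
    let now := now + w
    if now ≤ weight then countLoopB weight rest now + 1 else countLoopB weight rest 0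

def solution_alt (bridge_length : Int) (weight : Int) (truck_weights : List Int) : Int :=
  match truck_weights with
  | [] => 0  -- unreachable under Pre_solution: Python raises IndexError at truck_weights[0]
  | [_] => 0
  | t :: rest => (truck_weights.length : Int) * bridge_length + 1 + countLoopB weight rest t

-- ===== PRECONDITION & SPEC =====
-- Pre_ excludes only the empty truck list, on which both Pythons raise IndexError.
def Pre_solution (bridge_length : Int) (weight : Int) (truck_weights : List Int) : Prop :=
  truck_weights ≠ []
instance (bridge_length : Int) (weight : Int) (truck_weights : List Int) : Decidable (Pre_solution bridge_length weight truck_weights) := by unfold Pre_solution; infer_instance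
def pvWitness_solution : Int × Int × List Int := (10, 5, [3, 4, 2])
def Spec_solution (bridge_length : Int) (weight : Int) (truck_weights : List Int) (out : Int) : Prop := out = solution_alt bridge_length weight truck_weights
instance (bridge_length : Int) (weight : Int) (truck_weights : List Int) (out : Int) : Decidable (Spec_solution bridge_length weight truck_weights out) := by unfold Spec_solution; infer_instance

-- ===== CLAIM (what is proved, stated in full; the proofs are below) =====
def Claim_equal_solution : Prop := ∀ (bridge_length : Int) (weight : Int) (truck_weights : List Int), Dom_solution bridge_length weight truck_weights → Pre_solution bridge_length weight truck_weights → Spec_solution bridge_length weight truck_weights (solution bridge_length weight truck_weights)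

-- ===== LEMMAS AND PROOFS =====
theorem loopA_cons (bridge_length weight : Int) (w : Int) (rest : List Int) (now_weight answer : Int) :
    solutionLoopA bridge_length weight (w :: rest) now_weight answer
      = (let answer := if (w :: rest).length == 1 then answer + bridge_length + 1 else answer;
         let now_weight := now_weight + w;
         if now_weight ≤ weight then
           solutionLoopA bridge_length weight rest now_weight (answer + bridge_length + 1)
         else
           solutionLoopA bridge_length weight rest 0 (answer + bridge_length)) := rfl

theorem loopA_eq (bridge_length weight : Int) :
    ∀ (rest : List Int) (now ans : Int), rest ≠ [] →
      solutionLoopA bridge_length weight rest now ans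
        = ans + ((rest.length : Int) + 1) * bridge_length + 1 + countLoopB weight rest now := by
  intro rest
  induction rest with
  | nil => intro _ _ h; exact absurd rfl h
  | cons x rs ih =>
    intro now ans _
    rw [loopA_cons]
    cases rs with
    | nil =>
      simp only [List.length_cons, List.length_nil, Nat.zero_add, beq_self_eq_true, if_pos]
      simp only [solutionLoopA, countLoopB]
      split_ifs <;> push_cast <;> ring
    | cons y ys =>
      have hne : (y :: ys) ≠ ([] : List Int) := by simp
      have hlen : ((x :: y :: ys).length == 1) = false := by simp
      rw [hlen]
      simp only [Bool.false_eq_true, if_false]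
      split_ifs with h
      · rw [ih _ _ hne]
        simp only [countLoopB, h, if_pos, List.length_cons]
        push_cast; ring
      · rw [ih _ _ hne]
        simp only [countLoopB, h, if_neg, if_false, List.length_cons]
        push_cast; ring

-- ===== VERDICT (by name: the statement is the Claim_ definition above) =====
theorem solution_spec : Claim_equal_solution := by
  intro bridge_length weight truck_weights _ hpre
  unfold Spec_solution
  match truck_weights with
  | [] => exact absurd rfl hpre
  | [t] => rfl
  | t :: y :: ys =>
    show solutionLoopA bridge_length weight (y :: ys) t 0
        = ((t :: y :: ys).length : Int) * bridge_length + 1 + countLoopB weight (y :: ys) t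
    rw [loopA_eq bridge_length weight (y :: ys) t 0 (by simp)]
    simp only [List.length_cons]
    push_cast
    ring
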